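-- pv_equiv track=rewrite | github.com/TitoBarrosTI/fast-tools-for-dev | rules.py | seekText
-- ===== SOURCE A (Python) =====
-- def seekText(pattern, data:str ):
--     if not isinstance(pattern, str) or not pattern or not isinstance(data, str) or not str:
--         return []
--
--     results = []
--     ocurrence = 0
--     MAX_SHOW = 10
--
--     for num_line, line in enumerate(data.splitlines(), start=1):
--         begin = 0
--         while True:
--             pos = line.find(pattern, begin)
--             if pos == -1:
--                 break
--
--             ocurrence +=1
--
--             if ocurrence <= MAX_SHOW:
--                 if ocurrence == 1:
--                     results.append(
--                         f'Founded:\n\non the line {num_line}, collumn {pos}: {line}.strip()')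
--                 else:
--                     results.append(f'on the line {num_line}, collumn {pos}: {line}'.strip())
--
--             begin = pos + len(pattern)
--
--     if ocurrence > MAX_SHOW:
--         results.append(f'\n\n there may be more {(ocurrence-10)} ocurrences')
--
--     return results
-- ===== SOURCE B (Python) =====
-- def _starts(pattern, line):
--     cols = []
--     i = 0
--     while i + len(pattern) <= len(line):
--         if line.startswith(pattern, i):
--             cols.append(i)
--             i += len(pattern)
--         else:
--             i += 1
--     return cols
--
--
-- def seekText(pattern, data):
--     if not isinstance(pattern, str) or not pattern or not isinstance(data, str):
--         return []
--
--     hits = [(num_line, col, line)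
--             for num_line, line in enumerate(data.splitlines(), start=1)
--             for col in _starts(pattern, line)]
--
--     results = [
--         f'Founded:\n\non the line {n}, collumn {c}: {line}.strip()' if k == 0
--         else f'on the line {n}, collumn {c}: {line}'.strip()
--         for k, (n, c, line) in enumerate(hits[:10])
--     ]
--     if len(hits) > 10:
--         results.append(f'\n\n there may be more {len(hits) - 10} ocurrences')
--     return results
-- ===== Notes on version B (the rewrite author's own statement) =====
-- stated objective: alternative
-- what changed: B first collects the complete list of (line, column, line-text) occurrence triples with a per-line startswith walk, then formats the first ten (and the overflow message) in a separate pass over that list, instead of A's single pass that interleaves find-with-start jumps with a global occurrence counter and conditional formatting.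
import Mathlib
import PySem

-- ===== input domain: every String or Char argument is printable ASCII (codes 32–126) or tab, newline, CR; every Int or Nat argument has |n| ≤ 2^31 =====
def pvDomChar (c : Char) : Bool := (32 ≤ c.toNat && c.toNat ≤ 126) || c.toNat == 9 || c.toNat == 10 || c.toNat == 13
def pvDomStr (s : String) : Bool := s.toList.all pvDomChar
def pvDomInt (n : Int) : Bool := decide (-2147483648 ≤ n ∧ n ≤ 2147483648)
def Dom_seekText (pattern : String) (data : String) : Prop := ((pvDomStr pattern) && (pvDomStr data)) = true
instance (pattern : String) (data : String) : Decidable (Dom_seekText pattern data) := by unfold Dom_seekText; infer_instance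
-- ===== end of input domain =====

-- B replaces A's interleaved find-jump/counter loop by a collect-then-format decomposition (alternative structure, same return value).

-- ===== PORT A =====
-- shared format helpers: the f-string literals are identical in both Pythons
def pvFmt1 (numLine : Int) (pos : Nat) (line : List Char) : String :=
  String.ofList ("Founded:\n\non the line ".toList ++ PySem.Int.toChars numLine ++
    ", collumn ".toList ++ PySem.Int.toChars (pos : Int) ++ ": ".toList ++ line ++ ".strip()".toList)

def pvFmt2 (numLine : Int) (pos : Nat) (line : List Char) : String :=
  String.ofList (PySem.Chars.strip ("on the line ".toList ++ PySem.Int.toChars numLine ++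
    ", collumn ".toList ++ PySem.Int.toChars (pos : Int) ++ ": ".toList ++ line))

def pvTail (occ : Int) : String :=
  String.ofList ("\n\n there may be more ".toList ++ PySem.Int.toChars (occ - 10) ++ " ocurrences".toList)

-- A's loop body: increment the counter, conditionally append the formatted message
def pvStep (numLine : Int) (line : List Char) (st : Nat × List String) (pos : Nat) : Nat × List String :=
  (st.1 + 1,
   if st.1 + 1 ≤ 10 then
     st.2 ++ [if st.1 + 1 = 1 then pvFmt1 numLine pos line else pvFmt2 numLine pos line]
   else st.2)

-- A's inner `while True: pos = line.find(pattern, begin)` loop (fuel makes it total; A only runs it with pattern ≠ '')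
def seekTextLoop (pattern line : List Char) (numLine : Int) :
    Nat → Nat → Nat × List String → Nat × List String
  | 0, _, st => st
  | fuel+1, b, st =>
    let pos := PySem.Chars.findFrom line pattern (b : Int) none
    if pos = -1 then st
    else seekTextLoop pattern line numLine fuel (pos.toNat + pattern.length)
          (pvStep numLine line st pos.toNat)

def seekText (pattern : String) (data : String) : List String :=
  if pattern = "" then [] else
  let st := (PySem.List.enumerate (PySem.Chars.splitlines data.toList) 1).foldl
    (fun st nl => seekTextLoop pattern.toList nl.2 nl.1 (nl.2.length + 1) 0 st) (0, [])
  if st.1 > 10 then st.2 ++ [pvTail (st.1 : Int)] else st.2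

-- ===== PORT B =====
-- B's helper _starts: one-char walk with startswith, skipping the match length on a hit (fuel makes it total)
def pvStarts (pattern line : List Char) : Nat → Nat → List Nat
  | 0, _ => []
  | fuel+1, i =>
    if i + pattern.length ≤ line.length then
      if PySem.Chars.startswith (line.drop i) pattern then
        i :: pvStarts pattern line fuel (i + pattern.length)
      else pvStarts pattern line fuel (i + 1)
    else []

def pvFmtK (k : Int) (h : Int × Nat × List Char) : String :=
  if k = 0 then pvFmt1 h.1 h.2.1 h.2.2 else pvFmt2 h.1 h.2.1 h.2.2

def seekText_alt (pattern : String) (data : String) : List String :=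
  if pattern = "" then [] else
  let hits := (PySem.List.enumerate (PySem.Chars.splitlines data.toList) 1).flatMap
      (fun nl => (pvStarts pattern.toList nl.2 (nl.2.length + 1) 0).map (fun c => (nl.1, c, nl.2)))
  let results := (PySem.List.enumerate (PySem.List.slice hits none (some 10)) 0).map
      (fun kh => pvFmtK kh.1 kh.2)
  if hits.length > 10 then results ++ [pvTail (hits.length : Int)] else results

-- ===== PRECONDITION & SPEC =====
def Spec_seekText (pattern : String) (data : String) (out : List String) : Prop := out = seekText_alt pattern data
instance (pattern : String) (data : String) (out : List String) : Decidable (Spec_seekText pattern data out) := by unfold Spec_seekText; infer_instance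

-- ===== CLAIM (what is proved, stated in full; the proofs are below) =====
def Claim_equal_seekText : Prop := ∀ (pattern : String) (data : String), Dom_seekText pattern data → Spec_seekText pattern data (seekText pattern data)

-- ===== LEMMAS AND PROOFS =====

def pvStepH (st : Nat × List String) (h : Int × Nat × List Char) : Nat × List String :=
  pvStep h.1 h.2.2 st h.2.1

def pvRender : Nat → List (Int × Nat × List Char) → List String
  | _, [] => []
  | o, h :: t =>
    (if o + 1 ≤ 10 then [if o + 1 = 1 then pvFmt1 h.1 h.2.1 h.2.2 else pvFmt2 h.1 h.2.1 h.2.2] else [])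
      ++ pvRender (o + 1) t

lemma pvNoPrefix (p line : List Char) (b : Nat) (h : ¬ p <:+: line.drop b) :
    ∀ k, b ≤ k → ¬ p <+: line.drop k := by
  intro k hk hpre
  apply h
  have hdk : line.drop k = (line.drop b).drop (k - b) := by
    rw [List.drop_drop]; congr 1; omega
  rw [hdk] at hpre
  exact hpre.isInfix.trans (List.drop_suffix _ _).isInfix

lemma pvStarts_nil (p line : List Char) : ∀ fb i, (∀ k, i ≤ k → ¬ p <+: line.drop k) →
    pvStarts p line fb i = [] := by
  intro fb
  induction fb with
  | zero => intro i _; rfl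
  | succ fb ih =>
    intro i h
    simp only [pvStarts]
    split_ifs with h1 h2
    · exact absurd ((PySem.Chars.startswith_iff _ _).mp h2) (h i le_rfl)
    · exact ih (i + 1) (fun k hk => h k (by omega))
    · rfl

lemma pvStarts_skip (p line : List Char) :
    ∀ d i fb, i + d + p.length ≤ line.length →
    (∀ k, i ≤ k → k < i + d → ¬ p <+: line.drop k) →
    pvStarts p line (fb + d) i = pvStarts p line fb (i + d) := by
  intro d
  induction d with
  | zero => intro i fb _ _; rfl
  | succ d ih =>
    intro i fb hlen h
    have hsw : PySem.Chars.startswith (line.drop i) p = false := by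
      rw [Bool.eq_false_iff]
      intro hc
      exact h i le_rfl (by omega) ((PySem.Chars.startswith_iff _ _).mp hc)
    have hfb : fb + (d + 1) = (fb + d) + 1 := by omega
    rw [hfb]
    have hstep : pvStarts p line ((fb + d) + 1) i = pvStarts p line (fb + d) (i + 1) := by
      simp [pvStarts, hsw, show i + p.length ≤ line.length by omega]
    rw [hstep, ih (i + 1) fb (by omega) (fun k hk1 hk2 => h k (by omega) (by omega)),
      show i + 1 + d = i + (d + 1) by omega]

lemma pvLoop_eq (p line : List Char) (hp : p ≠ []) (nl : Int) :
    ∀ fa b fb st, b ≤ line.length → line.length + 1 - b ≤ fa → line.length + 1 - b ≤ fb →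
    seekTextLoop p line nl fa b st = (pvStarts p line fb b).foldl (pvStep nl line) st := by
  intro fa
  induction fa with
  | zero => intro b fb st hb hfa hfb; omega
  | succ fa ih =>
    intro b fb st hb hfa hfb
    by_cases hpos : PySem.Chars.findFrom line p (b : Int) none = -1
    · rw [pvStarts_nil p line fb b
        (pvNoPrefix p line b ((PySem.Chars.findFrom_natCast_eq_neg_one_iff line p b hb).mp hpos))]
      simp [seekTextLoop, hpos]
    · obtain ⟨hble, hpre, hmin⟩ := PySem.Chars.findFrom_natCast_spec line p b hb hpos
      set pos := PySem.Chars.findFrom line p (b : Int) none with hposdef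
      have hq : b ≤ pos.toNat := by omega
      have hlp : 1 ≤ p.length := by
        cases p with
        | nil => exact absurd rfl hp
        | cons a l => simp
      have hplen : p.length ≤ line.length - pos.toNat := by
        have := hpre.length_le
        rwa [List.length_drop] at this
      have hqlen : pos.toNat + p.length ≤ line.length := by omega
      -- rewrite RHS: skip the non-matching positions
      have hskip := pvStarts_skip p line (pos.toNat - b) b (fb - (pos.toNat - b))
        (by omega) (fun k hk1 hk2 => hmin k hk1 (by omega))
      have hfbeq : (fb - (pos.toNat - b)) + (pos.toNat - b) = fb := by omega
      rw [hfbeq] at hskip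
      have hbq : b + (pos.toNat - b) = pos.toNat := by omega
      rw [hbq] at hskip
      obtain ⟨g, hg⟩ : ∃ g, fb - (pos.toNat - b) = g + 1 := ⟨fb - (pos.toNat - b) - 1, by omega⟩
      rw [hskip, hg]
      have hsw : PySem.Chars.startswith (line.drop pos.toNat) p = true :=
        (PySem.Chars.startswith_iff _ _).mpr hpre
      simp only [pvStarts, if_pos hqlen, hsw, if_true, List.foldl_cons]
      simp only [seekTextLoop]
      rw [← hposdef, if_neg hpos]
      exact ih (pos.toNat + p.length) g (pvStep nl line st pos.toNat)
        hqlen (by omega) (by omega)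

lemma pvFoldl_step (H : List (Int × Nat × List Char)) :
    ∀ o r, H.foldl pvStepH (o, r) = (o + H.length, r ++ pvRender o H) := by
  induction H with
  | nil => intro o r; simp [pvRender]
  | cons h t ih =>
    intro o r
    simp only [List.foldl_cons, pvRender, List.length_cons]
    have hstep : pvStepH (o, r) h =
        (o + 1, r ++ (if o + 1 ≤ 10 then
          [if o + 1 = 1 then pvFmt1 h.1 h.2.1 h.2.2 else pvFmt2 h.1 h.2.1 h.2.2] else [])) := by
      simp only [pvStepH, pvStep]
      split_ifs <;> simp
    rw [hstep, ih]
    refine Prod.ext (by simp; omega) ?_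
    simp [List.append_assoc]

lemma pvRender_eq (H : List (Int × Nat × List Char)) :
    ∀ o : Nat, pvRender o H =
      (PySem.List.enumerate (H.take (10 - o)) (o : Int)).map (fun kh => pvFmtK kh.1 kh.2) := by
  induction H with
  | nil => intro o; simp [pvRender]
  | cons h t ih =>
    intro o
    by_cases ho : o + 1 ≤ 10
    · have h10 : 10 - o = (10 - (o + 1)) + 1 := by omega
      rw [h10, List.take_succ_cons]
      simp only [pvRender, if_pos ho, PySem.List.enumerate_cons, List.map_cons]
      have hk : pvFmtK (o : Int) h =
          if o + 1 = 1 then pvFmt1 h.1 h.2.1 h.2.2 else pvFmt2 h.1 h.2.1 h.2.2 := by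
        simp only [pvFmtK]
        by_cases hz : o = 0
        · simp [hz]
        · rw [if_neg (by exact_mod_cast hz), if_neg (by omega)]
      rw [hk, ih (o + 1)]
      push_cast
      simp
    · have h10 : 10 - o = 0 := by omega
      have h10' : 10 - (o + 1) = 0 := by omega
      simp only [pvRender, if_neg ho, List.nil_append, h10, List.take_zero,
        PySem.List.enumerate_nil, List.map_nil]
      rw [ih (o + 1), h10', List.take_zero, PySem.List.enumerate_nil, List.map_nil]

-- ===== VERDICT (by name: the statement is the Claim_ definition above) =====
theorem seekText_spec : Claim_equal_seekText := by
  intro pattern data _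
  unfold Spec_seekText seekText seekText_alt
  by_cases hp : pattern = ""
  · simp [hp]
  · have hpne : pattern.toList ≠ [] := fun hc => hp (String.toList_eq_nil_iff.mp hc)
    simp only [if_neg hp]
    have hfun : (fun (st : Nat × List String) (nl : Int × List Char) =>
        seekTextLoop pattern.toList nl.2 nl.1 (nl.2.length + 1) 0 st) =
        fun st nl => ((pvStarts pattern.toList nl.2 (nl.2.length + 1) 0).map
          (fun c => (nl.1, c, nl.2))).foldl pvStepH st := by
      funext st nl
      rw [pvLoop_eq pattern.toList nl.2 hpne nl.1 (nl.2.length + 1) 0 (nl.2.length + 1) st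
        (Nat.zero_le _) (by omega) (by omega)]
      rw [List.foldl_map]
      rfl
    rw [hfun, ← List.foldl_flatMap]
    set hits := (PySem.List.enumerate (PySem.Chars.splitlines data.toList) 1).flatMap
      (fun nl => (pvStarts pattern.toList nl.2 (nl.2.length + 1) 0).map
        (fun c => (nl.1, c, nl.2))) with hhits
    rw [pvFoldl_step hits 0 []]
    have hslice : PySem.List.slice hits none (some 10) = hits.take 10 := by
      rw [PySem.List.slice_to hits (by norm_num)]
      norm_num
      omega
    rw [hslice]
    have hrender : pvRender 0 hits =
        (PySem.List.enumerate (hits.take 10) 0).map (fun kh => pvFmtK kh.1 kh.2) := by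
      have := pvRender_eq hits 0
      simpa using this
    simp only [Nat.zero_add, List.nil_append, hrender]
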